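-- pv_equiv track=rewrite | github.com/Shef06/runningPosture3-12 | backend/gait_event_detection.py | _filter_close_events
-- ===== SOURCE A (Python) =====
-- from typing import List, Tuple, Dict
--
-- def _filter_close_events(events: List[int], other_events: List[int], min_duration: int) -> List[int]:
--     """
--     Filtra eventi troppo vicini ad altri eventi
--
--     Args:
--         events: Lista di frame indices da filtrare
--         other_events: Lista di altri eventi da usare come riferimento
--         min_duration: Durata minima in frame tra eventi
--
--     Returns:
--         Lista filtrata di eventi
--     """
--     if not events or not other_events:
--         return events
--
--     filtered = []
--     for event in events:
--         # Verifica che non ci siano altri eventi troppo vicini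
--         too_close = False
--         for other in other_events:
--             if abs(event - other) < min_duration:
--                 too_close = True
--                 break
--
--         if not too_close:
--             filtered.append(event)
--
--     return filtered
-- ===== SOURCE B (Python) =====
-- from typing import List
--
--
-- def _filter_close_events(events: List[int], other_events: List[int], min_duration: int) -> List[int]:
--     # Sort the reference events once, then binary-search the nearest neighbor
--     # of each event: O((n+m) log m) instead of A's O(n*m).
--     s = sorted(other_events)
--     out = []
--     for event in events:
--         lo, hi = 0, len(s)
--         while lo < hi:
--             mid = (lo + hi) // 2
--             if s[mid] < event:
--                 lo = mid + 1
--             else: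
--                 hi = mid
--         close = (lo > 0 and event - s[lo - 1] < min_duration) or \
--                 (lo < len(s) and s[lo] - event < min_duration)
--         if not close:
--             out.append(event)
--     return out
-- ===== Notes on version B (the rewrite author's own statement) =====
-- stated objective: faster
-- what changed: B sorts other_events once and binary-searches each event's insertion point, checking only the two neighboring reference events, instead of A's inner linear scan over other_events for every event.
import Mathlib
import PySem

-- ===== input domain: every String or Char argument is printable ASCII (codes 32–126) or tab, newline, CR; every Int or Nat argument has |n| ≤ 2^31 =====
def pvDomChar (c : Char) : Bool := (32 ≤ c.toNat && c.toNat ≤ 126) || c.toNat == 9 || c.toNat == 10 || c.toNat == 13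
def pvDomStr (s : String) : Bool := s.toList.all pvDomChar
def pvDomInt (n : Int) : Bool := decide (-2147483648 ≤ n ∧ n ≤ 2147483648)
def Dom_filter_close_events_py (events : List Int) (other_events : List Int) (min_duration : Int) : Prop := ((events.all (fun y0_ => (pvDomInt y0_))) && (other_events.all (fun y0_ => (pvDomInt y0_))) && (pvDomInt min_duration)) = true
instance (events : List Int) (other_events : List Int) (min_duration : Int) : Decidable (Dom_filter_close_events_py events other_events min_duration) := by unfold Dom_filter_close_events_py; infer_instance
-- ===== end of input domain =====

-- B replaces A's inner linear scan over other_events by sorting other_events once and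
-- binary-searching each event's nearest neighbors (objective: faster, O((n+m) log m)).

-- ===== PORT A =====
-- inner 'for other in other_events: if abs(...) < min_duration: too_close = True; break'
def pvA_tooClose (event : Int) (others : List Int) (d : Int) : Bool :=
  match others with
  | [] => false
  | o :: rest => if |event - o| < d then true else pvA_tooClose event rest d

def filter_close_events_py (events : List Int) (other_events : List Int) (min_duration : Int) : List Int :=
  if events = [] ∨ other_events = [] then events
  else
    events.foldl (fun filtered event =>
      if !(pvA_tooClose event other_events min_duration) then filtered ++ [event] else filtered) []

-- ===== PORT B =====
-- the hand-written 'while lo < hi' binary-search loop of Source B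
def pvB_bisect (s : List Int) (x : Int) (lo hi : Nat) : Nat :=
  if lo < hi then
    if s.getD ((lo + hi) / 2) 0 < x then pvB_bisect s x ((lo + hi) / 2 + 1) hi
    else pvB_bisect s x lo ((lo + hi) / 2)
  else lo
termination_by hi - lo
decreasing_by all_goals omega

def filter_close_events_py_alt (events : List Int) (other_events : List Int) (min_duration : Int) : List Int :=
  let s := PySem.List.sorted other_events (fun x => x) false
  events.foldl (fun out event =>
    let lo := pvB_bisect s event 0 s.length
    let close := (decide (0 < lo) && decide (event - s.getD (lo - 1) 0 < min_duration))
              || (decide (lo < s.length) && decide (s.getD lo 0 - event < min_duration))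
    if !close then out ++ [event] else out) []

-- ===== PRECONDITION & SPEC =====
def Spec_filter_close_events_py (events : List Int) (other_events : List Int) (min_duration : Int) (out : List Int) : Prop := out = filter_close_events_py_alt events other_events min_duration
instance (events : List Int) (other_events : List Int) (min_duration : Int) (out : List Int) : Decidable (Spec_filter_close_events_py events other_events min_duration out) := by unfold Spec_filter_close_events_py; infer_instance

-- ===== CLAIM (what is proved, stated in full; the proofs are below) =====
def Claim_equal_filter_close_events_py : Prop := ∀ (events : List Int) (other_events : List Int) (min_duration : Int), Dom_filter_close_events_py events other_events min_duration → Spec_filter_close_events_py events other_events min_duration (filter_close_events_py events other_events min_duration)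

-- ===== LEMMAS AND PROOFS =====

theorem pvA_tooClose_iff (event : Int) (others : List Int) (d : Int) :
    pvA_tooClose event others d = true ↔ ∃ o ∈ others, |event - o| < d := by
  induction others with
  | nil => simp [pvA_tooClose]
  | cons o rest ih =>
    simp only [pvA_tooClose]
    split_ifs with h <;> simp [h, ih]

theorem pv_getD_mono (s : List Int) (hs : s.Pairwise (· ≤ ·)) (i j : Nat)
    (hij : i ≤ j) (hj : j < s.length) : s.getD i 0 ≤ s.getD j 0 := by
  rcases eq_or_lt_of_le hij with rfl | hlt
  · exact le_refl _
  · rw [List.getD_eq_getElem s 0 (lt_trans hlt hj), List.getD_eq_getElem s 0 hj]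
    exact (List.pairwise_iff_getElem.mp hs) i j (lt_trans hlt hj) hj hlt

theorem pvB_bisect_spec (s : List Int) (x : Int) (hs : s.Pairwise (· ≤ ·)) :
    ∀ (lo hi : Nat), lo ≤ hi → hi ≤ s.length →
    (∀ j < lo, s.getD j 0 < x) →
    (∀ j, hi ≤ j → j < s.length → x ≤ s.getD j 0) →
    lo ≤ pvB_bisect s x lo hi ∧ pvB_bisect s x lo hi ≤ hi ∧
    (∀ j < pvB_bisect s x lo hi, s.getD j 0 < x) ∧
    (∀ j, pvB_bisect s x lo hi ≤ j → j < s.length → x ≤ s.getD j 0) := by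
  intro lo hi
  induction lo, hi using pvB_bisect.induct s x with
  | case1 lo hi hlt hmid ih =>
    intro hle hhi hbelow habove
    rw [pvB_bisect, if_pos hlt, if_pos hmid]
    have hnew : ∀ j < (lo + hi) / 2 + 1, s.getD j 0 < x := by
      intro j hj
      calc s.getD j 0 ≤ s.getD ((lo + hi) / 2) 0 :=
            pv_getD_mono s hs j _ (by omega) (by omega)
        _ < x := hmid
    have := ih (by omega) hhi hnew habove
    exact ⟨by omega, this.2.1, this.2.2⟩
  | case2 lo hi hlt hmid ih =>
    intro hle hhi hbelow habove
    rw [pvB_bisect, if_pos hlt, if_neg hmid]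
    have hnew : ∀ j, (lo + hi) / 2 ≤ j → j < s.length → x ≤ s.getD j 0 := by
      intro j hj hjl
      calc x ≤ s.getD ((lo + hi) / 2) 0 := le_of_not_gt hmid
        _ ≤ s.getD j 0 := pv_getD_mono s hs _ j hj hjl
    have := ih (by omega) (by omega) hbelow hnew
    exact ⟨this.1, by omega, this.2.2⟩
  | case3 lo hi hlt =>
    intro hle hhi hbelow habove
    rw [pvB_bisect, if_neg hlt]
    exact ⟨le_refl _, hle, hbelow, fun j hj hjl => habove j (by omega) hjl⟩

theorem pv_close_iff (s : List Int) (x d : Int) (hs : s.Pairwise (· ≤ ·)) :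
    (let i := pvB_bisect s x 0 s.length
     ((decide (0 < i) && decide (x - s.getD (i - 1) 0 < d))
      || (decide (i < s.length) && decide (s.getD i 0 - x < d))) = true)
    ↔ ∃ o ∈ s, |x - o| < d := by
  have spec := pvB_bisect_spec s x hs 0 s.length (Nat.zero_le _) (le_refl _)
    (by omega) (by intro j h1 h2; omega)
  set i := pvB_bisect s x 0 s.length with hi
  obtain ⟨-, hile, hbelow, habove⟩ := spec
  simp only [Bool.or_eq_true, Bool.and_eq_true, decide_eq_true_eq]
  constructor
  · rintro (⟨hpos, hc⟩ | ⟨hlt, hc⟩)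
    · have hm : i - 1 < s.length := by omega
      refine ⟨s.getD (i - 1) 0, by rw [List.getD_eq_getElem s 0 hm]; exact List.getElem_mem hm, ?_⟩
      have hb := hbelow (i - 1) (by omega)
      rw [abs_of_pos (by omega)]; exact hc
    · refine ⟨s.getD i 0, by rw [List.getD_eq_getElem s 0 hlt]; exact List.getElem_mem hlt, ?_⟩
      have ha := habove i (le_refl _) hlt
      rw [abs_of_nonpos (by omega), neg_sub]; exact hc
  · rintro ⟨o, ho, hclose⟩
    obtain ⟨j, hj, rfl⟩ := List.mem_iff_getElem.mp ho
    have hjd : s.getD j 0 = s[j] := List.getD_eq_getElem s 0 hj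
    by_cases hlt : s[j] < x
    · -- o below x: j < i, so the left neighbor s[i-1] is at least as close
      have hji : j < i := by
        by_contra hge
        exact absurd (habove j (by omega) hj) (by rw [hjd]; omega)
      left
      refine ⟨by omega, ?_⟩
      have hm : i - 1 < s.length := by omega
      have h1 : s.getD j 0 ≤ s.getD (i - 1) 0 := pv_getD_mono s hs j (i - 1) (by omega) hm
      rw [abs_of_pos (by omega)] at hclose
      omega
    · -- o at or above x: i ≤ j, so s[i] is at least as close
      have hji : i ≤ j := by
        by_contra hge
        exact absurd (hbelow j (by omega)) (by rw [hjd]; omega)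
      right
      refine ⟨by omega, ?_⟩
      have h1 : s.getD i 0 ≤ s.getD j 0 := pv_getD_mono s hs i j hji hj
      rw [abs_of_nonpos (by omega), neg_sub] at hclose
      omega

-- ===== VERDICT (by name: the statement is the Claim_ definition above) =====
theorem filter_close_events_py_spec : Claim_equal_filter_close_events_py := by
  intro events other_events min_duration _
  unfold Spec_filter_close_events_py filter_close_events_py filter_close_events_py_alt
  have hperm := PySem.List.sorted_perm other_events (fun x : Int => x) false
  have hpair : (PySem.List.sorted other_events (fun x : Int => x) false).Pairwise (· ≤ ·) :=
    PySem.List.sorted_pairwise other_events (fun x : Int => x)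
  set s := PySem.List.sorted other_events (fun x : Int => x) false with hsdef
  rw [PySem.List.foldl_append_if_eq_filter, PySem.List.foldl_append_if_eq_filter,
    List.nil_append, List.nil_append]
  have hpt : ∀ e : Int,
      (!(pvA_tooClose e other_events min_duration)) =
      (!((decide (0 < pvB_bisect s e 0 s.length) &&
          decide (e - s.getD (pvB_bisect s e 0 s.length - 1) 0 < min_duration))
        || (decide (pvB_bisect s e 0 s.length < s.length) &&
          decide (s.getD (pvB_bisect s e 0 s.length) 0 - e < min_duration)))) := by
    intro e
    congr 1
    by_cases h : ∃ o ∈ other_events, |e - o| < min_duration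
    · rw [(pvA_tooClose_iff e other_events min_duration).mpr h,
        (pv_close_iff s e min_duration hpair).mpr (by
          obtain ⟨o, ho, hc⟩ := h
          exact ⟨o, (hperm.mem_iff).mpr ho, hc⟩)]
    · rw [Bool.eq_iff_iff, pvA_tooClose_iff, pv_close_iff s e min_duration hpair]
      constructor
      · intro ⟨o, ho, hc⟩; exact ⟨o, (hperm.mem_iff).mpr ho, hc⟩
      · intro ⟨o, ho, hc⟩; exact ⟨o, (hperm.mem_iff).mp ho, hc⟩
  split_ifs with h
  · rcases h with rfl | rfl
    · simp
    · -- other_events = []: s = [], the bisect check is always false, filter keeps everything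
      have hs : s = [] := by simp [hsdef, PySem.List.sorted]
      rw [List.filter_eq_self.mpr]
      intro e _
      rw [← hpt e]
      simp [pvA_tooClose]
  · exact List.filter_congr (fun e _ => hpt e)
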